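-- pv_equiv track=rewrite | github.com/XiwenLuo2003/HomeBenchReproduction | code/model_test_SALKV8_IC.py | _clean_inner_logic
-- ===== SOURCE A (Python) =====
-- def _clean_inner_logic(text):
--     stop_signals = ["<User instructions:>", "-------------------------------", "<home_state>", "<device_method>", "User:", "Machine instructions:", "Example:", "<Thought>"]
--     min_index = len(text)
--     for signal in stop_signals:
--         idx = text.find(signal)
--         if idx != -1 and idx < min_index: min_index = idx
--     text = text[:min_index].strip()
--
--     if "." in text and "(" in text and "error_input" in text:
--         lines = text.split('\n')
--         valid_lines = [line.strip() for line in lines if "." in line and "(" in line]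
--         text = "\n".join(valid_lines) if valid_lines else "error_input"
--     return text
-- ===== SOURCE B (Python) =====
-- def _clean_inner_logic(text):
--     stop_signals = ["<User instructions:>", "-------------------------------", "<home_state>", "<device_method>", "User:", "Machine instructions:", "Example:", "<Thought>"]
--     # single left-to-right scan: cut at the first position where any stop signal starts
--     cut = len(text)
--     for i in range(len(text)):
--         if any(text.startswith(s, i) for s in stop_signals):
--             cut = i
--             break
--     head = text[:cut].strip()
--     if "." in head and "(" in head and "error_input" in head:
--         valid_lines = [line.strip() for line in head.split('\n') if "." in line and "(" in line]
--         head = "\n".join(valid_lines) if valid_lines else "error_input"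
--     return head
-- ===== Notes on version B (the rewrite author's own statement) =====
-- stated objective: alternative
-- what changed: A scans the whole text once per stop signal with str.find and keeps the minimum index; B makes a single left-to-right scan over positions and cuts at the first position where any signal starts (breaking immediately), trading per-signal C-level find calls for one early-exiting pass; the line-filter block is the same.
import Mathlib
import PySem

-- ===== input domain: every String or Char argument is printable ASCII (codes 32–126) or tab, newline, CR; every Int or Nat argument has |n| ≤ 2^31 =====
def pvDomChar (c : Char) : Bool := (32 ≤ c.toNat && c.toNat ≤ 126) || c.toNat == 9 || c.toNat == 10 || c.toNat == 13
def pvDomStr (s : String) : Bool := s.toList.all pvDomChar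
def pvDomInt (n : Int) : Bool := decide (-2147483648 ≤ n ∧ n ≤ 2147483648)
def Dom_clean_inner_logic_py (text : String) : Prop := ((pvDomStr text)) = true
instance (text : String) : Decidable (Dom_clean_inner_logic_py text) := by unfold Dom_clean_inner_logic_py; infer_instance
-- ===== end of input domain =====

-- B replaces A's per-signal find/min loop by one left-to-right scan that stops at the first
-- position where any stop signal starts (objective: alternative traversal, same result).

-- ===== PORT A =====
def pvStops : List (List Char) :=
  ["<User instructions:>".toList, "-------------------------------".toList, "<home_state>".toList,
   "<device_method>".toList, "User:".toList, "Machine instructions:".toList, "Example:".toList,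
   "<Thought>".toList]

def clean_inner_logic_py (text : String) : String :=
  let s := text.toList
  let minIndex : Int := pvStops.foldl (fun m sig =>
      let idx := PySem.Chars.find s sig
      if idx ≠ -1 ∧ idx < m then idx else m) (s.length : Int)
  let t := PySem.Chars.strip (PySem.Chars.slice s none (some minIndex))
  if PySem.Chars.isIn ['.'] t && PySem.Chars.isIn ['('] t && PySem.Chars.isIn "error_input".toList t then
    let lines := PySem.Chars.splitOn t ['\n']
    let valid := (lines.filter (fun l => PySem.Chars.isIn ['.'] l && PySem.Chars.isIn ['('] l)).map PySem.Chars.strip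
    String.ofList (if valid ≠ [] then PySem.Chars.join ['\n'] valid else "error_input".toList)
  else String.ofList t

-- ===== PORT B =====
-- the 'for i in range(len(text)): if any(text.startswith(sig, i)): cut = i; break' scan,
-- as structural recursion on the suffix starting at i (cut = len(text) when no signal occurs)
def pvCutScan (s : List Char) : Nat :=
  match s with
  | [] => 0
  | c :: rest =>
    if pvStops.any (fun sig => PySem.Chars.startswith (c :: rest) sig) then 0
    else pvCutScan rest + 1

def clean_inner_logic_py_alt (text : String) : String :=
  let s := text.toList
  let head := PySem.Chars.strip (s.take (pvCutScan s))
  if PySem.Chars.isIn ['.'] head && PySem.Chars.isIn ['('] head && PySem.Chars.isIn "error_input".toList head then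
    let valid := (PySem.Chars.splitOn head ['\n']).filterMap
        (fun line => if PySem.Chars.isIn ['.'] line && PySem.Chars.isIn ['('] line
                     then some (PySem.Chars.strip line) else none)
    String.ofList (if valid ≠ [] then PySem.Chars.join ['\n'] valid else "error_input".toList)
  else String.ofList head

-- ===== PRECONDITION & SPEC =====
def Spec_clean_inner_logic_py (text : String) (out : String) : Prop := out = clean_inner_logic_py_alt text
instance (text : String) (out : String) : Decidable (Spec_clean_inner_logic_py text out) := by unfold Spec_clean_inner_logic_py; infer_instance

-- ===== CLAIM (what is proved, stated in full; the proofs are below) =====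
def Claim_equal_clean_inner_logic_py : Prop := ∀ (text : String), Dom_clean_inner_logic_py text → Spec_clean_inner_logic_py text (clean_inner_logic_py text)

-- ===== LEMMAS AND PROOFS =====

theorem pvCutScan_le_len (s : List Char) : pvCutScan s ≤ s.length := by
  induction s with
  | nil => simp [pvCutScan]
  | cons c rest ih =>
    simp only [pvCutScan, List.length_cons]
    split <;> omega

theorem pvCutScan_no_match (s : List Char) :
    ∀ j < pvCutScan s, ∀ sig ∈ pvStops, ¬ sig <+: s.drop j := by
  induction s with
  | nil => simp [pvCutScan]
  | cons c rest ih =>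
    intro j hj sig hsig
    simp only [pvCutScan] at hj
    split at hj
    · omega
    · rename_i hno
      rw [Bool.not_eq_true, List.any_eq_false] at hno
      cases j with
      | zero =>
        have := hno sig (by exact hsig)
        simpa [PySem.Chars.startswith_iff] using this
      | succ j' =>
        simpa using ih j' (by omega) sig hsig

theorem pvCutScan_match (s : List Char) (h : pvCutScan s ≠ s.length) :
    ∃ sig ∈ pvStops, sig <+: s.drop (pvCutScan s) := by
  induction s with
  | nil => simp [pvCutScan] at h
  | cons c rest ih =>
    by_cases hyes : (pvStops.any fun sig => PySem.Chars.startswith (c :: rest) sig) = true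
    · rw [List.any_eq_true] at hyes
      obtain ⟨sig, hsig, hsw⟩ := hyes
      refine ⟨sig, hsig, ?_⟩
      rw [pvCutScan, if_pos (by rw [List.any_eq_true]; exact ⟨sig, hsig, hsw⟩)]
      simpa [PySem.Chars.startswith_iff] using hsw
    · rw [pvCutScan, if_neg hyes] at h ⊢
      simp only [List.length_cons] at h
      simpa using ih (by omega)

theorem pvFoldl_spec (s : List Char) (sigs : List (List Char)) (m : Int) :
    (sigs.foldl (fun m sig =>
        if PySem.Chars.find s sig ≠ -1 ∧ PySem.Chars.find s sig < m then PySem.Chars.find s sig else m) m = m ∨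
      ∃ sig ∈ sigs, sigs.foldl (fun m sig =>
        if PySem.Chars.find s sig ≠ -1 ∧ PySem.Chars.find s sig < m then PySem.Chars.find s sig else m) m = PySem.Chars.find s sig ∧ PySem.Chars.find s sig ≠ -1)
    ∧ sigs.foldl (fun m sig =>
        if PySem.Chars.find s sig ≠ -1 ∧ PySem.Chars.find s sig < m then PySem.Chars.find s sig else m) m ≤ m
    ∧ ∀ sig ∈ sigs, PySem.Chars.find s sig ≠ -1 →
        sigs.foldl (fun m sig =>
          if PySem.Chars.find s sig ≠ -1 ∧ PySem.Chars.find s sig < m then PySem.Chars.find s sig else m) m ≤ PySem.Chars.find s sig := by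
  induction sigs generalizing m with
  | nil => simp
  | cons a rest ih =>
    simp only [List.foldl_cons]
    set m' := if PySem.Chars.find s a ≠ -1 ∧ PySem.Chars.find s a < m then PySem.Chars.find s a else m with hm'
    obtain ⟨h1, h2, h3⟩ := ih m'
    have hm'le : m' ≤ m := by rw [hm']; split <;> omega
    have hm'cases : m' = m ∨ (m' = PySem.Chars.find s a ∧ PySem.Chars.find s a ≠ -1) := by
      rw [hm']; split
      · rename_i hc; exact Or.inr ⟨rfl, hc.1⟩
      · exact Or.inl rfl
    refine ⟨?_, le_trans h2 hm'le, ?_⟩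
    · rcases h1 with h1 | ⟨sig, hsig, he, hne⟩
      · rcases hm'cases with h | ⟨he, hne⟩
        · exact Or.inl (h1.trans h)
        · exact Or.inr ⟨a, by simp, h1.trans he, hne⟩
      · exact Or.inr ⟨sig, by simp [hsig], he, hne⟩
    · intro sig hsig hne
      rcases List.mem_cons.mp hsig with h | h
      · subst h
        rcases hm'cases with h | ⟨he, _⟩
        · -- m' = m means the if did not fire: find = -1 or m ≤ find
          have : ¬ (PySem.Chars.find s sig ≠ -1 ∧ PySem.Chars.find s sig < m) := by
            intro hc
            rw [hm', if_pos hc] at h; omega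
          push Not at this
          exact le_trans (h2.trans hm'le) (this hne)
        · rw [← he]; exact h2
      · exact h3 sig h hne

theorem pvMin_eq_cut (s : List Char) :
    pvStops.foldl (fun m sig =>
        if PySem.Chars.find s sig ≠ -1 ∧ PySem.Chars.find s sig < m then PySem.Chars.find s sig else m) (s.length : Int)
      = (pvCutScan s : Int) := by
  obtain ⟨h1, h2, h3⟩ := pvFoldl_spec s pvStops (s.length : Int)
  set F := pvStops.foldl (fun m sig =>
        if PySem.Chars.find s sig ≠ -1 ∧ PySem.Chars.find s sig < m then PySem.Chars.find s sig else m) (s.length : Int) with hF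
  have hcle : pvCutScan s ≤ s.length := pvCutScan_le_len s
  have hle : F ≤ (pvCutScan s : Int) := by
    by_cases hc : pvCutScan s = s.length
    · rw [hc]; exact h2
    · obtain ⟨sig, hsig, hpre⟩ := pvCutScan_match s hc
      have hfind0 : 0 ≤ PySem.Chars.find s sig := (PySem.Chars.find_nonneg_iff s sig).mpr
        (List.IsInfix.trans hpre.isInfix (List.drop_suffix _ _).isInfix)
      obtain ⟨_, hmin⟩ := PySem.Chars.find_spec hfind0
      have hfc : (PySem.Chars.find s sig).toNat ≤ pvCutScan s := by
        by_contra hlt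
        exact hmin (pvCutScan s) (by omega) hpre
      have := h3 sig hsig (by omega)
      omega
  have hge : (pvCutScan s : Int) ≤ F := by
    rcases h1 with h | ⟨sig, hsig, he, hne⟩
    · rw [h]; exact_mod_cast hcle
    · have hfind0 : 0 ≤ PySem.Chars.find s sig := by
        have := PySem.Chars.neg_one_le_find (s := s) (sub := sig)
        omega
      obtain ⟨hpre, _⟩ := PySem.Chars.find_spec hfind0
      have : ¬ (PySem.Chars.find s sig).toNat < pvCutScan s := by
        intro hlt
        exact pvCutScan_no_match s _ hlt sig hsig hpre
      rw [he]; omega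
  omega

theorem pvFilterMap_eq {α β : Type} (p : α → Bool) (f : α → β) (l : List α) :
    l.filterMap (fun x => if p x then some (f x) else none) = (l.filter p).map f := by
  induction l with
  | nil => rfl
  | cons a t ih => by_cases h : p a <;> simp [h, ih]

-- ===== VERDICT (by name: the statement is the Claim_ definition above) =====
theorem clean_inner_logic_py_spec : Claim_equal_clean_inner_logic_py := by
  intro text _
  unfold Spec_clean_inner_logic_py clean_inner_logic_py clean_inner_logic_py_alt
  simp only [pvMin_eq_cut, pvFilterMap_eq]
  rw [PySem.Chars.slice_eq_listSlice, PySem.List.slice_to _ (by positivity), Int.toNat_natCast]
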